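-- pv_equiv track=rewrite | github.com/devbok0101/killing-camp | camp/8week/Robot2.py | soulution
-- ===== SOURCE A (Python) =====
-- from itertools import combinations
-- from typing import List
--
-- def soulution(needs: List[List[int]], r: int) -> int:
--     answer = 0
--
--     for comb in combinations(range(len(needs[0])), r):
--         comb = set(comb)
--         count = 0
--         for need in needs:
--             for i, item in enumerate(need):
--                 if i not in comb and item:
--                     break
--             else:
--                 count += 1
--         answer = max(answer, count)
--
--     return answer
-- ===== SOURCE B (Python) =====
-- from itertools import combinations
-- from typing import List
--
-- def soulution(needs: List[List[int]], r: int) -> int: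
--     m = len(needs[0])
--     masks = []
--     for need in needs:
--         mk = 0
--         for i, item in enumerate(need):
--             if item:
--                 mk |= 1 << i
--         masks.append(mk)
--     best = 0
--     for comb in combinations(range(m), r):
--         cm = 0
--         for i in comb:
--             cm |= 1 << i
--         cnt = 0
--         for mk in masks:
--             if mk & cm == mk:
--                 cnt += 1
--         if cnt > best:
--             best = cnt
--     return best
-- ===== Notes on version B (the rewrite author's own statement) =====
-- stated objective: alternative
-- what changed: B precomputes one bitmask per row (its set of required columns) in a single pass, then tests each row per combination with one integer subset test (mask & cm == mask) instead of A's per-combination rescan of every row's columns with a set-membership check and break.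
-- outside the precondition, e.g. on soulution([], 1): A raises IndexError, B raises IndexError; on soulution([[1]], -1): A raises ValueError, B raises ValueError
import Mathlib
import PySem

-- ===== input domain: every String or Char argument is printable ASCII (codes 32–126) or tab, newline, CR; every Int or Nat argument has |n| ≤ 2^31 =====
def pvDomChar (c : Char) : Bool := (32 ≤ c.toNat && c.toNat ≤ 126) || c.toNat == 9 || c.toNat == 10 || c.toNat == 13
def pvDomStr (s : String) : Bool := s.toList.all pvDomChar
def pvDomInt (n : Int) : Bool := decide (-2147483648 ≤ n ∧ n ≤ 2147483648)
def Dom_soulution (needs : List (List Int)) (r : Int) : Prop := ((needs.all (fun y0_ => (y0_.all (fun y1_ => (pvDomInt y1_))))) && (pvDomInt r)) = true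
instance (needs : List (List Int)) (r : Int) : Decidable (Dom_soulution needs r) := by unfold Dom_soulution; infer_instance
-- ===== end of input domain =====

-- B replaces A's per-combination row-by-column scan (set membership + break) with per-row
-- bitmasks precomputed once and an integer subset test per row (alternative algorithm).

-- itertools.combinations of the elements of a list, in itertools order (shared library helper)
def pvCombos {α : Type} : List α → Nat → List (List α)
  | _, 0 => [[]]
  | [], _ + 1 => []
  | x :: xs, n + 1 => (pvCombos xs n).map (x :: ·) ++ pvCombos xs (n + 1)

-- enumerate(need) with Nat indices (indices in this program are always ≥ 0)
def pvEnum (s : Nat) : List Int → List (Nat × Int)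
  | [] => []
  | x :: xs => (s, x) :: pvEnum (s + 1) xs

-- ===== PORT A =====
-- A's inner `for i, item in enumerate(need): if i not in comb and item: break / else:`
def pvRowOkA (comb : List Nat) : List (Nat × Int) → Bool
  | [] => true
  | (i, x) :: rest => if (!(comb.contains i)) && (x != 0) then false else pvRowOkA comb rest

def soulution (needs : List (List Int)) (r : Int) : Int :=
  let m := (needs.headD []).length
  (pvCombos (List.range m) r.toNat).foldl
    (fun answer comb =>
      let count := needs.foldl
        (fun c need => if pvRowOkA comb (pvEnum 0 need) then c + 1 else c) (0 : Int)
      max answer count) 0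

-- ===== PORT B =====
def pvMaskStep (mk : Nat) (p : Nat × Int) : Nat :=
  if p.2 != 0 then mk ||| (1 <<< p.1) else mk

def pvMaskOf (need : List Int) : Nat :=
  (pvEnum 0 need).foldl pvMaskStep 0

def soulution_alt (needs : List (List Int)) (r : Int) : Int :=
  let m := (needs.headD []).length
  let masks := needs.map pvMaskOf
  (pvCombos (List.range m) r.toNat).foldl
    (fun best comb =>
      let cm := comb.foldl (fun a i => a ||| (1 <<< i)) 0
      let cnt := masks.foldl (fun c mk => if mk &&& cm == mk then c + 1 else c) (0 : Int)
      if cnt > best then cnt else best) 0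

-- ===== PRECONDITION & SPEC =====
-- Pre_: Python A raises IndexError on needs = [] (needs[0]) and ValueError on r < 0.
def Pre_soulution (needs : List (List Int)) (r : Int) : Prop := needs ≠ [] ∧ 0 ≤ r
instance (needs : List (List Int)) (r : Int) : Decidable (Pre_soulution needs r) := by
  unfold Pre_soulution; infer_instance

def pvWitness_soulution : List (List Int) × Int := ([[0, 1], [1, 0], [0, 0]], 1)

def Spec_soulution (needs : List (List Int)) (r : Int) (out : Int) : Prop := out = soulution_alt needs r
instance (needs : List (List Int)) (r : Int) (out : Int) : Decidable (Spec_soulution needs r out) := by unfold Spec_soulution; infer_instance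

-- ===== CLAIM (what is proved, stated in full; the proofs are below) =====
def Claim_equal_soulution : Prop := ∀ (needs : List (List Int)) (r : Int), Dom_soulution needs r → Pre_soulution needs r → Spec_soulution needs r (soulution needs r)

-- ===== LEMMAS AND PROOFS =====

-- generic: foldl of pointwise-equal step functions
theorem pv_foldl_congr {α β : Type} (f g : β → α → β) (l : List α) (a : β)
    (h : ∀ b x, x ∈ l → f b x = g b x) : l.foldl f a = l.foldl g a := by
  induction l generalizing a with
  | nil => rfl
  | cons x xs ih =>
      simp only [List.foldl_cons]
      rw [h a x (by simp)]
      exact ih _ (fun b y hy => h b y (by simp [hy]))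

-- bits of the accumulated bitmask of a row
theorem pv_testBit_maskFold (l : List (Nat × Int)) (a : Nat) (j : Nat) :
    ((l.foldl pvMaskStep a).testBit j = true ↔
      a.testBit j = true ∨ ∃ p ∈ l, p.1 = j ∧ p.2 ≠ 0) := by
  induction l generalizing a with
  | nil => simp
  | cons p rest ih =>
      obtain ⟨i, x⟩ := p
      simp only [List.foldl_cons]
      rw [ih]
      by_cases hx : x = 0
      · subst hx
        simp [pvMaskStep]
      · have hstep : pvMaskStep a (i, x) = a ||| (1 <<< i) := by
          simp [pvMaskStep, hx]
        rw [hstep]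
        constructor
        · rintro (h | h)
          · rw [Nat.one_shiftLeft, Nat.testBit_or] at h
            rcases Bool.or_eq_true_iff.mp h with h' | h'
            · exact Or.inl h'
            · have : i = j := by
                by_contra hne
                rw [Nat.testBit_two_pow_of_ne hne] at h'
                exact Bool.false_ne_true h'
              exact Or.inr ⟨(i, x), List.mem_cons_self, this, hx⟩
          · rcases h with ⟨q, hq, hj, hq0⟩
            exact Or.inr ⟨q, List.mem_cons_of_mem _ hq, hj, hq0⟩
        · rintro (h | ⟨q, hq, hj, hq0⟩)
          · exact Or.inl (by rw [Nat.one_shiftLeft, Nat.testBit_or, h, Bool.true_or])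
          · rcases List.mem_cons.mp hq with rfl | hq'
            · refine Or.inl ?_
              rw [Nat.one_shiftLeft, Nat.testBit_or]
              simp only at hj
              rw [hj, Nat.testBit_two_pow_self, Bool.or_true]
            · exact Or.inr ⟨q, hq', hj, hq0⟩

-- bits of the combination mask
theorem pv_testBit_combFold (l : List Nat) (a : Nat) (j : Nat) :
    ((l.foldl (fun a i => a ||| (1 <<< i)) a).testBit j = true ↔
      a.testBit j = true ∨ j ∈ l) := by
  induction l generalizing a with
  | nil => simp
  | cons i rest ih =>
      simp only [List.foldl_cons]
      rw [ih]
      constructor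
      · rintro (h | h)
        · rw [Nat.one_shiftLeft, Nat.testBit_or] at h
          rcases Bool.or_eq_true_iff.mp h with h' | h'
          · exact Or.inl h'
          · have : i = j := by
              by_contra hne
              rw [Nat.testBit_two_pow_of_ne hne] at h'
              exact Bool.false_ne_true h'
            exact Or.inr (this ▸ List.mem_cons_self)
        · exact Or.inr (List.mem_cons_of_mem _ h)
      · rintro (h | h)
        · exact Or.inl (by rw [Nat.one_shiftLeft, Nat.testBit_or, h, Bool.true_or])
        · rcases List.mem_cons.mp h with rfl | h'
          · exact Or.inl (by rw [Nat.one_shiftLeft, Nat.testBit_or, Nat.testBit_two_pow_self, Bool.or_true])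
          · exact Or.inr h'

-- subset test via &&&
theorem pv_and_eq_self_iff (mk cm : Nat) :
    (mk &&& cm = mk) ↔ ∀ j, mk.testBit j = true → cm.testBit j = true := by
  constructor
  · intro h j hj
    have h2 := congrArg (fun n => Nat.testBit n j) h
    simp only [Nat.testBit_and, hj, Bool.true_and] at h2
    exact h2
  · intro h
    apply Nat.eq_of_testBit_eq
    intro j
    rw [Nat.testBit_and]
    cases hm : mk.testBit j
    · simp
    · simp [h j hm]

-- A's inner scan characterised
theorem pv_rowOkA_iff (comb : List Nat) (l : List (Nat × Int)) :
    pvRowOkA comb l = true ↔ ∀ p ∈ l, p.2 ≠ 0 → p.1 ∈ comb := by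
  induction l with
  | nil => simp [pvRowOkA]
  | cons p rest ih =>
      obtain ⟨i, x⟩ := p
      by_cases hc : ((!(comb.contains i)) && (x != 0)) = true
      · rw [pvRowOkA, if_pos hc]
        simp only [Bool.and_eq_true, Bool.not_eq_true', bne_iff_ne, ne_eq] at hc
        constructor
        · intro h; exact absurd h Bool.false_ne_true
        · intro h
          have hmem : i ∈ comb := h (i, x) List.mem_cons_self hc.2
          rw [← List.contains_iff_mem, hc.1] at hmem
          exact absurd hmem Bool.false_ne_true
      · rw [pvRowOkA, if_neg hc]
        rw [ih]
        simp only [Bool.and_eq_true, Bool.not_eq_true', bne_iff_ne, ne_eq, not_and, not_not] at hc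
        constructor
        · intro h q hq hq0
          rcases List.mem_cons.mp hq with rfl | hq'
          · by_cases hcont : comb.contains i = true
            · exact List.contains_iff_mem.mp hcont
            · exact absurd (hc (Bool.eq_false_iff.mpr hcont)) hq0
          · exact h q hq' hq0
        · intro h q hq hq0
          exact h q (List.mem_cons_of_mem _ hq) hq0

-- row equivalence: A's scan over the row = B's mask subset test
theorem pv_row_eq (comb : List Nat) (need : List Int) :
    pvRowOkA comb (pvEnum 0 need) =
      ((pvMaskOf need) &&& (comb.foldl (fun a i => a ||| (1 <<< i)) 0) == pvMaskOf need) := by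
  by_cases h : pvRowOkA comb (pvEnum 0 need) = true
  · rw [h]
    symm
    rw [beq_iff_eq, pv_and_eq_self_iff]
    intro j hj
    rw [pvMaskOf] at hj
    rw [pv_testBit_maskFold] at hj
    rcases hj with h0 | ⟨p, hp, hj, hp0⟩
    · simp at h0
    · rw [pv_testBit_combFold]
      exact Or.inr (hj ▸ (pv_rowOkA_iff comb _).mp h p hp hp0)
  · rw [Bool.eq_false_iff.mpr h]
    symm
    rw [beq_eq_false_iff_ne]
    intro hand
    apply h
    rw [pv_rowOkA_iff]
    intro p hp hp0
    have hb : (pvMaskOf need).testBit p.1 = true := by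
      rw [pvMaskOf, pv_testBit_maskFold]
      exact Or.inr ⟨p, hp, rfl, hp0⟩
    have hc := (pv_and_eq_self_iff _ _).mp hand p.1 hb
    rcases (pv_testBit_combFold comb 0 p.1).mp hc with h0 | hmem
    · simp at h0
    · exact hmem

-- ===== VERDICT (by name: the statement is the Claim_ definition above) =====
theorem soulution_spec : Claim_equal_soulution := by
  intro needs r _ _
  unfold Spec_soulution soulution soulution_alt
  apply pv_foldl_congr
  intro b comb _
  simp only []
  rw [List.foldl_map]
  have hcnt : needs.foldl (fun c need => if pvRowOkA comb (pvEnum 0 need) then c + 1 else c) (0 : Int)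
      = needs.foldl (fun c need =>
          if pvMaskOf need &&& (comb.foldl (fun a i => a ||| (1 <<< i)) 0) == pvMaskOf need
          then c + 1 else c) (0 : Int) := by
    apply pv_foldl_congr
    intro c need _
    rw [pv_row_eq]
  rw [hcnt]
  set cnt := needs.foldl (fun c need =>
      if pvMaskOf need &&& (comb.foldl (fun a i => a ||| (1 <<< i)) 0) == pvMaskOf need
      then c + 1 else c) (0 : Int) with hdef
  by_cases h : cnt > b
  · rw [if_pos h, max_eq_right h.le]
  · rw [if_neg h, max_eq_left (not_lt.mp h)]
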